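-- pv_equiv track=rewrite | github.com/brayden-s-haws/python_for_business | dataAnalysis/__init__.py | get_age_group
-- ===== SOURCE A (Python) =====
-- def get_age_group(age, age_group_increment=10,age_limit=80):
--     '''Takes an age value and groups it into buckets that are determined by the arguments of the function
--     :param int age: the age value that you want to categorize
--     :param int age_group_increment: this defines the increment between age groups
--     :param int age_limit: this is the maximum age that an age value can be grouped into
--     :return: str
--     '''
--     starting_age=0
--     if age is None:
--         return None
--     while starting_age < age_limit:
--         ending_age = starting_age + age_group_increment
--         if age >= starting_age and age < ending_age:
--             return f'{starting_age}-{ending_age}'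
--         starting_age = ending_age
--
--     return f'{age_limit}+'
-- ===== SOURCE B (Python) =====
-- def get_age_group(age, age_group_increment=10, age_limit=80):
--     '''Closed-form bucketing: compute the bucket start by floor division
--     instead of scanning the multiples one by one.'''
--     if age is None:
--         return None
--     start = (age // age_group_increment) * age_group_increment
--     if 0 <= start < age_limit:
--         return f'{start}-{start + age_group_increment}'
--     return f'{age_limit}+'
-- ===== Notes on version B (the rewrite author's own statement) =====
-- stated objective: faster
-- what changed: Replaces A's linear scan over the multiples of age_group_increment with a single floor-division computing the bucket start in O(1).
-- outside the precondition, e.g. on get_age_group(5, 0, -3): A returns '-3+', B raises ZeroDivisionError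
import Mathlib
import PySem

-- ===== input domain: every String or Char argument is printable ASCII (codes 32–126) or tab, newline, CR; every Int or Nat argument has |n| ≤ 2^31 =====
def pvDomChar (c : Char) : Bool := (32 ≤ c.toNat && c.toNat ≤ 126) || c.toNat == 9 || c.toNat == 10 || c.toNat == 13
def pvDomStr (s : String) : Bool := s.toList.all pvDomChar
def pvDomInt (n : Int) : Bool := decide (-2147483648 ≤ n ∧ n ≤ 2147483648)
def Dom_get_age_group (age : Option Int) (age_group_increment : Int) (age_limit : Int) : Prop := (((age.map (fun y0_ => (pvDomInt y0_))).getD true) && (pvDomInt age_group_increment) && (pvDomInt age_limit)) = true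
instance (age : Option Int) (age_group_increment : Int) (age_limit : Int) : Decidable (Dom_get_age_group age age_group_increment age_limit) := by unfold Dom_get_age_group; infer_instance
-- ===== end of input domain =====

-- B replaces A's bucket-by-bucket scan with one floor division (O(1) instead of a loop).

-- ===== PORT A =====
-- A's while-loop as fuel recursion; the fuel (age_limit.toNat + 1) is never exhausted
-- on Pre_ inputs since starting_age grows by age_group_increment ≥ 1 each step.
def getAgeGroupLoopA (fuel : Nat) (starting_age a inc limit : Int) : String :=
  match fuel with
  | 0 => PySem.Int.toStr limit ++ "+"   -- unreachable under Pre_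
  | fuel + 1 =>
    if starting_age < limit then
      let ending_age := starting_age + inc
      if a ≥ starting_age ∧ a < ending_age then
        PySem.Int.toStr starting_age ++ "-" ++ PySem.Int.toStr ending_age
      else
        getAgeGroupLoopA fuel ending_age a inc limit
    else
      PySem.Int.toStr limit ++ "+"

def get_age_group (age : Option Int) (age_group_increment : Int) (age_limit : Int) : Option String :=
  match age with
  | none => none
  | some a => some (getAgeGroupLoopA (age_limit.toNat + 1) 0 a age_group_increment age_limit)

-- ===== PORT B =====
def get_age_group_alt (age : Option Int) (age_group_increment : Int) (age_limit : Int) : Option String :=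
  match age with
  | none => none
  | some a =>
    let start := (PySem.Int.floordiv a age_group_increment) * age_group_increment
    some (if 0 ≤ start ∧ start < age_limit then
            PySem.Int.toStr start ++ "-" ++ PySem.Int.toStr (start + age_group_increment)
          else
            PySem.Int.toStr age_limit ++ "+")

-- ===== PRECONDITION & SPEC =====
-- Pre_ excludes non-positive increments (with a non-None age): there A never returns
-- normally when age_limit > 0 (its loop never terminates), and with increment 0 and
-- age_limit ≤ 0 A only falls through to '{age_limit}+' while B's floor division
-- raises ZeroDivisionError.
def Pre_get_age_group (age : Option Int) (age_group_increment : Int) (age_limit : Int) : Prop :=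
  age = none ∨ 0 < age_group_increment ∨ (age_limit ≤ 0 ∧ age_group_increment < 0)
instance (age : Option Int) (age_group_increment : Int) (age_limit : Int) : Decidable (Pre_get_age_group age age_group_increment age_limit) := by unfold Pre_get_age_group; infer_instance

def pvWitness_get_age_group : Option Int × Int × Int := (some 27, 10, 80)

def Spec_get_age_group (age : Option Int) (age_group_increment : Int) (age_limit : Int) (out : Option String) : Prop := out = get_age_group_alt age age_group_increment age_limit
instance (age : Option Int) (age_group_increment : Int) (age_limit : Int) (out : Option String) : Decidable (Spec_get_age_group age age_group_increment age_limit out) := by unfold Spec_get_age_group; infer_instance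

-- ===== CLAIM (what is proved, stated in full; the proofs are below) =====
def Claim_equal_get_age_group : Prop := ∀ (age : Option Int) (age_group_increment : Int) (age_limit : Int), Dom_get_age_group age age_group_increment age_limit → Pre_get_age_group age age_group_increment age_limit → Spec_get_age_group age age_group_increment age_limit (get_age_group age age_group_increment age_limit)

-- ===== LEMMAS AND PROOFS =====

-- A's loop returns the fall-through value whenever the age is negative
-- (starting_age stays ≥ 0, so the bucket test never fires).
theorem loopA_neg (fuel : Nat) (starting_age a inc limit : Int)
    (hinc : 0 < inc) (hs : 0 ≤ starting_age) (ha : a < 0)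
    (hfuel : (limit - starting_age).toNat < fuel) :
    getAgeGroupLoopA fuel starting_age a inc limit = PySem.Int.toStr limit ++ "+" := by
  induction fuel generalizing starting_age with
  | zero => omega
  | succ n ih =>
    unfold getAgeGroupLoopA
    by_cases h : starting_age < limit
    · simp only [h, if_true]
      have : ¬ (a ≥ starting_age ∧ a < starting_age + inc) := by omega
      simp only [this, if_false]
      exact ih (starting_age + inc) (by omega) (by omega)
    · simp [h]

-- A's loop, for nonnegative age and positive increment, returns the bucket of
-- s = (a / inc) * inc when 0 ≤ s < limit, else the fall-through value.
theorem loopA_nonneg (fuel : Nat) (starting_age a inc limit : Int)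
    (hinc : 0 < inc) (ha : 0 ≤ a)
    (hdvd : inc ∣ starting_age) (hs0 : 0 ≤ starting_age)
    (hle : starting_age ≤ a / inc * inc)
    (hfuel : (limit - starting_age).toNat < fuel) :
    getAgeGroupLoopA fuel starting_age a inc limit =
      (if a / inc * inc < limit then
        PySem.Int.toStr (a / inc * inc) ++ "-" ++ PySem.Int.toStr (a / inc * inc + inc)
      else PySem.Int.toStr limit ++ "+") := by
  have hmod0 : 0 ≤ a % inc := Int.emod_nonneg a (by omega)
  have hmodlt : a % inc < inc := Int.emod_lt_of_pos a hinc
  have hdm : a / inc * inc + a % inc = a := Int.ediv_add_emod' a inc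
  induction fuel generalizing starting_age with
  | zero => omega
  | succ n ih =>
    unfold getAgeGroupLoopA
    by_cases h : starting_age < limit
    · simp only [h, if_true]
      by_cases hm : a ≥ starting_age ∧ a < starting_age + inc
      · -- bucket found: starting_age = a / inc * inc
        have heq : starting_age = a / inc * inc := by
          -- a < starting_age + inc forces a / inc * inc < starting_age + inc
          have h1 : a / inc * inc < starting_age + inc := by omega
          -- both are multiples of inc with starting_age ≤ a/inc*inc < starting_age + inc
          obtain ⟨k, hk⟩ := hdvd
          have hdvd2 : inc ∣ a / inc * inc := ⟨a / inc, mul_comm _ _⟩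
          obtain ⟨m, hm2⟩ := hdvd2
          have : k ≤ m ∧ m < k + 1 := by
            constructor
            · by_contra hc
              push_neg at hc
              have : m + 1 ≤ k := by omega
              nlinarith
            · by_contra hc
              push_neg at hc
              nlinarith
          have : m = k := by omega
          rw [hk, hm2, this]
        simp only [heq]
        rw [if_pos (show a / inc * inc < limit by rw [← heq]; exact h),
            if_pos (show a ≥ a / inc * inc ∧ a < a / inc * inc + inc by rw [← heq]; exact hm)]
      · -- no match: a ≥ starting_age + inc, advance
        simp only [hm, if_false]
        have hge : starting_age + inc ≤ a := by omega
        obtain ⟨k, hk⟩ := hdvd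
        have hnext_le : starting_age + inc ≤ a / inc * inc := by
          -- k + 1 ≤ a / inc since (k+1)*inc ≤ a
          have h1 : (k + 1) * inc ≤ a := by nlinarith
          have h2 : k + 1 ≤ a / inc := by
            rw [Int.le_ediv_iff_mul_le hinc]; linarith
          nlinarith
        exact ih (starting_age + inc) ⟨k + 1, by linarith [hk]⟩ (by omega) hnext_le (by omega)
    · -- loop exits: limit ≤ starting_age ≤ a/inc*inc, so the if is false
      simp only [h, if_false]
      rw [if_neg (by omega)]

-- ===== VERDICT (by name: the statement is the Claim_ definition above) =====
theorem get_age_group_spec : Claim_equal_get_age_group := by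
  intro age inc limit _ hpre
  unfold Spec_get_age_group
  match age with
  | none => rfl
  | some a =>
    have hpre' : 0 < inc ∨ (limit ≤ 0 ∧ inc < 0) := by
      rcases hpre with h | h | h
      · exact absurd h (by simp)
      · exact Or.inl h
      · exact Or.inr h
    change some (getAgeGroupLoopA (limit.toNat + 1) 0 a inc limit) =
      some (if 0 ≤ PySem.Int.floordiv a inc * inc ∧ PySem.Int.floordiv a inc * inc < limit then
              PySem.Int.toStr (PySem.Int.floordiv a inc * inc) ++ "-" ++
                PySem.Int.toStr (PySem.Int.floordiv a inc * inc + inc)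
            else PySem.Int.toStr limit ++ "+")
    rcases hpre' with hinc | ⟨hlim, hinc⟩
    · rw [PySem.Int.floordiv_eq_ediv_of_pos hinc]
      by_cases ha : 0 ≤ a
      · have hs : 0 ≤ a / inc * inc :=
          mul_nonneg (Int.ediv_nonneg ha (by omega)) (by omega)
        rw [loopA_nonneg (limit.toNat + 1) 0 a inc limit hinc ha (dvd_zero inc) le_rfl
            hs (by omega)]
        by_cases hlt : a / inc * inc < limit
        · rw [if_pos hlt, if_pos ⟨hs, hlt⟩]
        · rw [if_neg hlt, if_neg (by omega)]
      · rw [loopA_neg (limit.toNat + 1) 0 a inc limit hinc le_rfl (by omega) (by omega)]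
        have ha' : a < 0 := by omega
        have hs : a / inc * inc < 0 := by
          have h1 := Int.ediv_add_emod a inc
          have h2 := Int.emod_nonneg a (show inc ≠ 0 by omega)
          nlinarith
        rw [if_neg (by omega)]
    · -- age_limit ≤ 0, inc < 0: A exits immediately; B's range test is vacuous
      unfold getAgeGroupLoopA
      rw [if_neg (show ¬ (0:Int) < limit by omega),
          if_neg (show ¬ (0 ≤ PySem.Int.floordiv a inc * inc ∧
            PySem.Int.floordiv a inc * inc < limit) by omega)]
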